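-- pv_equiv track=rewrite | github.com/rookinc/hyperxi_lab | scripts/test_z2_voltage_lift.py | common_neighbor_profiles
-- ===== SOURCE A (Python) =====
-- from collections import defaultdict, Counter
-- from typing import Dict, List, Set, Tuple
--
-- def common_neighbor_profiles(adj: Dict[int, Set[int]]) -> Tuple[Counter, Counter]:
--     nodes = sorted(adj)
--     pa = Counter()
--     pn = Counter()
--     for i, u in enumerate(nodes):
--         for v in nodes[i + 1:]:
--             c = len(adj[u] & adj[v])
--             if v in adj[u]:
--                 pa[c] += 1
--             else:
--                 pn[c] += 1
--     return pa, pn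
-- ===== SOURCE B (Python) =====
-- from collections import defaultdict, Counter
--
-- def common_neighbor_profiles(adj):
--     # Reverse index: inv[w] = nodes u whose neighbor set contains w.
--     inv = defaultdict(list)
--     for u, nbrs in adj.items():
--         for w in nbrs:
--             inv[w].append(u)
--     # Each common neighbor w of a pair (u, v) contributes one wedge.
--     wedge = Counter()
--     for ins in inv.values():
--         ins.sort()
--         for i, x in enumerate(ins):
--             for y in ins[i + 1:]:
--                 wedge[(x, y)] += 1
--     nodes = sorted(adj)
--     pa = Counter()
--     pn = Counter()
--     for i, u in enumerate(nodes):
--         au = adj[u]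
--         for v in nodes[i + 1:]:
--             c = wedge[(u, v)]
--             if v in au:
--                 pa[c] += 1
--             else:
--                 pn[c] += 1
--     return pa, pn
-- ===== Notes on version B (the rewrite author's own statement) =====
-- stated objective: alternative
-- what changed: Replaces the per-pair set intersection with a reverse index (w -> nodes adjacent to w) from which one wedge-counting pass precomputes every pair's common-neighbor count; the pair sweep then just looks the count up.
import Mathlib
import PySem

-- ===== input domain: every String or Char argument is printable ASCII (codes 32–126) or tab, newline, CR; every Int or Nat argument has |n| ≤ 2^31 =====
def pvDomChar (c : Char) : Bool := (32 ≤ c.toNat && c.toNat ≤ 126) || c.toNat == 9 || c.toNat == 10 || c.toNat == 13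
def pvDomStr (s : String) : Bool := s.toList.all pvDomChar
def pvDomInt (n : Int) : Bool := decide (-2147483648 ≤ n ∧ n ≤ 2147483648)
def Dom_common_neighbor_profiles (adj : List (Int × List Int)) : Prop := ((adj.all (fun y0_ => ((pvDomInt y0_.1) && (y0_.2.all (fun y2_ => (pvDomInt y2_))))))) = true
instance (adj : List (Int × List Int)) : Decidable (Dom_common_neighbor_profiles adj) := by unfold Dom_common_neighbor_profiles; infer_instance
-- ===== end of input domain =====

-- B replaces the per-pair set intersection with a reverse index (w -> nodes adjacent to w) and a
-- wedge-counting pass that precomputes every pair's common-neighbor count (alternative algorithm,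
-- same pair sweep order, so the Counters come out identical).

-- Shared input decoding: the Python argument is a dict mapping int keys to sets of ints
-- (dict: later duplicate key wins, keeps first position; set: duplicates collapse).
def pvAdjDict (adj : List (Int × List Int)) : PySem.Dict Int (List Int) :=
  adj.foldl (fun d p => d.insert p.1 (PySem.Set.ofList p.2)) PySem.Dict.empty

-- ===== PORT A =====
-- 'for i, u in enumerate(nodes): for v in nodes[i+1:]: …' — nodes[i+1:] is the tail after u.
def pvPairLoopA (d : PySem.Dict Int (List Int)) :
    List Int → (PySem.Dict Int Int × PySem.Dict Int Int) → (PySem.Dict Int Int × PySem.Dict Int Int)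
  | [], s => s
  | u :: rest, s =>
    pvPairLoopA d rest
      (rest.foldl (fun s v =>
        let c := PySem.Set.len (PySem.Set.inter (d.getD u []) (d.getD v []))
        if PySem.Set.contains (d.getD u []) v then (s.1.modify c 0 (· + 1), s.2)
        else (s.1, s.2.modify c 0 (· + 1))) s)

def common_neighbor_profiles (adj : List (Int × List Int)) : (List (Int × Int)) × (List (Int × Int)) :=
  let d := pvAdjDict adj
  let nodes := PySem.List.sorted d.keys (fun x => x) false
  let s := pvPairLoopA d nodes (PySem.Dict.empty, PySem.Dict.empty)
  (s.1.items, s.2.items)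

-- ===== PORT B =====
-- inv = defaultdict(list); for u, nbrs in adj.items(): for w in nbrs: inv[w].append(u)
def pvInv (d : PySem.Dict Int (List Int)) : PySem.Dict Int (List Int) :=
  d.items.foldl (fun inv p => p.2.foldl (fun inv w => inv.modify w [] (· ++ [p.1])) inv)
    PySem.Dict.empty

-- 'for i, x in enumerate(ins): for y in ins[i+1:]: wedge[(x, y)] += 1'
def pvWedgeLoop : List Int → PySem.Dict (Int × Int) Int → PySem.Dict (Int × Int) Int
  | [], wd => wd
  | x :: rest, wd => pvWedgeLoop rest (rest.foldl (fun wd y => wd.modify (x, y) 0 (· + 1)) wd)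

def pvWedgeOf (inv : PySem.Dict Int (List Int)) : PySem.Dict (Int × Int) Int :=
  inv.values.foldl (fun wd ins => pvWedgeLoop (PySem.List.sorted ins (fun x => x) false) wd)
    PySem.Dict.empty

def pvPairLoopB (d : PySem.Dict Int (List Int)) (wd : PySem.Dict (Int × Int) Int) :
    List Int → (PySem.Dict Int Int × PySem.Dict Int Int) → (PySem.Dict Int Int × PySem.Dict Int Int)
  | [], s => s
  | u :: rest, s =>
    pvPairLoopB d wd rest
      (rest.foldl (fun s v =>
        let c := wd.getD (u, v) 0
        if PySem.Set.contains (d.getD u []) v then (s.1.modify c 0 (· + 1), s.2)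
        else (s.1, s.2.modify c 0 (· + 1))) s)

def common_neighbor_profiles_alt (adj : List (Int × List Int)) : (List (Int × Int)) × (List (Int × Int)) :=
  let d := pvAdjDict adj
  let wd := pvWedgeOf (pvInv d)
  let nodes := PySem.List.sorted d.keys (fun x => x) false
  let s := pvPairLoopB d wd nodes (PySem.Dict.empty, PySem.Dict.empty)
  (s.1.items, s.2.items)

-- ===== PRECONDITION & SPEC =====
def Spec_common_neighbor_profiles (adj : List (Int × List Int)) (out : (List (Int × Int)) × (List (Int × Int))) : Prop := out = common_neighbor_profiles_alt adj
instance (adj : List (Int × List Int)) (out : (List (Int × Int)) × (List (Int × Int))) : Decidable (Spec_common_neighbor_profiles adj out) := by unfold Spec_common_neighbor_profiles; infer_instance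

-- ===== CLAIM (what is proved, stated in full; the proofs are below) =====
def Claim_equal_common_neighbor_profiles : Prop := ∀ (adj : List (Int × List Int)), Dom_common_neighbor_profiles adj → Spec_common_neighbor_profiles adj (common_neighbor_profiles adj)

-- ===== LEMMAS AND PROOFS =====

def pvPairs : List Int → List (Int × Int)
  | [] => []
  | x :: rest => rest.map (fun y => (x, y)) ++ pvPairs rest

theorem pvWedgeLoop_eq_foldl (l : List Int) (wd : PySem.Dict (Int × Int) Int) :
    pvWedgeLoop l wd = (pvPairs l).foldl (fun wd q => wd.modify q 0 (· + 1)) wd := by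
  induction l generalizing wd with
  | nil => rfl
  | cons x rest ih =>
      simp [pvWedgeLoop, pvPairs, List.foldl_append, List.foldl_map, ih]

theorem mem_pvPairs {l : List Int} {p : Int × Int} (hp : p ∈ pvPairs l) : p.1 ∈ l ∧ p.2 ∈ l := by
  induction l with
  | nil => simp [pvPairs] at hp
  | cons x rest ih =>
      simp only [pvPairs, List.mem_append, List.mem_map] at hp
      rcases hp with ⟨y, hy, rfl⟩ | hp
      · exact ⟨by simp, by simp [hy]⟩
      · rcases ih hp with ⟨h1, h2⟩; exact ⟨by simp [h1], by simp [h2]⟩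

theorem count_pvPairs (l : List Int) (hl : l.Pairwise (· < ·)) (u v : Int) :
    (pvPairs l).count (u, v) = if u ∈ l ∧ v ∈ l ∧ u < v then 1 else 0 := by
  induction l with
  | nil => simp [pvPairs]
  | cons x rest ih =>
      obtain ⟨hx, hrest⟩ := List.pairwise_cons.mp hl
      have hnd : rest.Nodup := hrest.imp (fun h => ne_of_lt h)
      have hxr : x ∉ rest := fun h => lt_irrefl x (hx x h)
      have hinj : Function.Injective (fun y : Int => (x, y)) := by
        intro a b h; simpa [Prod.ext_iff] using h
      rw [pvPairs, List.count_append]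
      rcases eq_or_ne x u with rfl | hne
      · have hmap : (rest.map (fun y => (x, y))).count (x, v) = rest.count v :=
          List.count_map_of_injective rest _ hinj v
        have h0 : (pvPairs rest).count (x, v) = 0 :=
          List.count_eq_zero.mpr (fun h => hxr (mem_pvPairs h).1)
        rw [hmap, h0]
        by_cases hv : v ∈ rest
        · have hlt : x < v := hx v hv
          simp [List.count_eq_one_of_mem hnd hv, hv, hlt]
        · rw [List.count_eq_zero_of_not_mem hv]
          rcases eq_or_ne v x with rfl | hvx
          · simp [hv]
          · simp [hv, hvx]
      · have hmap : (rest.map (fun y => (x, y))).count (u, v) = 0 := by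
          refine List.count_eq_zero.mpr (fun h => ?_)
          rcases List.mem_map.mp h with ⟨y, _, hy⟩
          exact hne (congrArg Prod.fst hy)
        rw [hmap, ih hrest]
        simp only [List.mem_cons]
        by_cases hu : u ∈ rest
        · rcases eq_or_ne v x with rfl | hvx
          · have : ¬ u < v := not_lt.mpr (le_of_lt (hx u hu))
            simp [hu, this, Ne.symm hne]
          · simp [hu, hvx, Ne.symm hne]
        · simp [hu, Ne.symm hne]

-- d = pvAdjDict adj: keys are nodup, every value is nodup
theorem pvAdjDict_keys_nodup (adj : List (Int × List Int)) : (pvAdjDict adj).keys.Nodup := by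
  unfold pvAdjDict
  exact PySem.Dict.nodup_keys_foldl_insert_key adj (fun p => p.1) _ _ PySem.Dict.nodup_keys_empty

theorem pvAdjDict_values_nodup (adj : List (Int × List Int)) :
    ∀ l ∈ (pvAdjDict adj).values, l.Nodup := by
  unfold pvAdjDict
  have h : ∀ (d : PySem.Dict Int (List Int)), (∀ l ∈ d.values, l.Nodup) →
      ∀ l ∈ (adj.foldl (fun d p => d.insert p.1 (PySem.Set.ofList p.2)) d).values, l.Nodup := by
    induction adj with
    | nil => intro d hd; simpa using hd
    | cons p rest ih =>
        intro d hd
        simp only [List.foldl_cons]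
        refine ih _ ?_
        intro l hl
        rcases PySem.Dict.mem_values_insert _ _ _ _ hl with h | h
        · subst h; exact PySem.Set.nodup_ofList _
        · exact hd _ h
  intro l hl
  exact h PySem.Dict.empty (by simp [PySem.Dict.values, PySem.Dict.empty]) l hl

def pvEdges (d : PySem.Dict Int (List Int)) : List (Int × Int) :=
  d.items.flatMap (fun p => p.2.map (fun w => (w, p.1)))

theorem pvInv_eq (d : PySem.Dict Int (List Int)) :
    pvInv d = (pvEdges d).foldl (fun inv q => inv.modify q.1 [] (· ++ [q.2])) PySem.Dict.empty := by
  unfold pvInv pvEdges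
  rw [List.flatMap_def, List.foldl_flatten, List.foldl_map]
  congr 1
  funext inv p
  rw [List.foldl_map]

theorem pvInv_keys_nodup (d : PySem.Dict Int (List Int)) : (pvInv d).keys.Nodup := by
  rw [pvInv_eq, PySem.Dict.keys_foldl_modify_key (pvEdges d) (fun q => q.1) [] (fun _ q l => l ++ [q.2])]
  rw [PySem.Dict.keys_empty, PySem.Set.update_nil_left]
  exact PySem.Set.nodup_ofList _

theorem mem_pvInv_keys (d : PySem.Dict Int (List Int)) (w : Int) :
    w ∈ (pvInv d).keys ↔ ∃ p ∈ d.items, w ∈ p.2 := by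
  rw [pvInv_eq, PySem.Dict.keys_foldl_modify_key (pvEdges d) (fun q => q.1) [] (fun _ q l => l ++ [q.2])]
  rw [PySem.Dict.keys_empty, PySem.Set.update_nil_left, PySem.Set.mem_ofList]
  unfold pvEdges
  simp

theorem pvInv_getD_aux (w : Int) (items : List (Int × List Int))
    (hv : ∀ p ∈ items, p.2.Nodup) :
    (List.filter (fun q : Int × Int => q.1 == w)
        (items.flatMap (fun p => p.2.map (fun w' => (w', p.1))))).map (·.2)
      = (items.filter (fun p => decide (w ∈ p.2))).map (·.1) := by
  induction items with
  | nil => simp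
  | cons p items ih =>
      rw [List.flatMap_cons, List.filter_append, List.map_append, List.filter_cons]
      have h1 : (List.filter (fun q : Int × Int => q.1 == w) (p.2.map (fun w' => (w', p.1)))).map (·.2)
          = if w ∈ p.2 then [p.1] else [] := by
        rw [List.filter_map]
        have h2 : ((fun q : Int × Int => q.1 == w) ∘ (fun w' => (w', p.1))) = (fun w' => w' == w) := rfl
        rw [h2, List.filter_beq, List.map_replicate]
        have hnd : p.2.Nodup := hv p (by simp)
        by_cases hw : w ∈ p.2
        · rw [List.count_eq_one_of_mem hnd hw]; simp [hw]
        · rw [List.count_eq_zero_of_not_mem hw]; simp [hw]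
      rw [h1, ih (fun q hq => hv q (by simp [hq]))]
      by_cases hw : w ∈ p.2 <;> simp [hw]

theorem pvInv_getD (d : PySem.Dict Int (List Int)) (hv : ∀ l ∈ d.values, l.Nodup) (w : Int) :
    (pvInv d).getD w [] = (d.items.filter (fun p => decide (w ∈ p.2))).map (·.1) := by
  rw [pvInv_eq, PySem.Dict.getD_foldl_modify_append, PySem.Dict.getD_empty, List.nil_append]
  unfold pvEdges
  exact pvInv_getD_aux w d.items (fun p hp => hv p.2 (List.mem_map.mpr ⟨p, hp, rfl⟩))

theorem sorted_id_pairwise_lt (l : List Int) (hnd : l.Nodup) :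
    (PySem.List.sorted l (fun x => x) false).Pairwise (· < ·) := by
  have h1 : (PySem.List.sorted l (fun x => x) false).Pairwise
      (fun a b => (fun x : Int => x) a ≤ (fun x : Int => x) b) :=
    PySem.List.sorted_pairwise _ _
  have h2 : (PySem.List.sorted l (fun x => x) false).Nodup :=
    (PySem.List.sorted_perm l (fun x => x) false).nodup_iff.mpr hnd
  exact (h1.and (List.nodup_iff_pairwise_ne.mp h2)).imp (fun h => lt_of_le_of_ne h.1 h.2)

theorem getD_eq_of_mem_keys (d : PySem.Dict Int (List Int)) (u : Int) (hu : u ∈ d.keys) :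
    (u, d.getD u []) ∈ d.items := by
  cases hget : d.get? u with
  | none => exact absurd hu ((PySem.Dict.get?_eq_none_iff_not_mem_keys d u).mp hget)
  | some val =>
      have := PySem.Dict.mem_items_of_get?_eq_some d hget
      rwa [PySem.Dict.getD_eq_get?_getD, hget]

theorem getD_values_nodup (d : PySem.Dict Int (List Int)) (hv : ∀ l ∈ d.values, l.Nodup)
    (u : Int) (hu : u ∈ d.keys) : (d.getD u []).Nodup := by
  have h := getD_eq_of_mem_keys d u hu
  exact hv _ (List.mem_map.mpr ⟨_, h, rfl⟩)

theorem pvInv_getD_nodup (d : PySem.Dict Int (List Int)) (hk : d.keys.Nodup)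
    (hv : ∀ l ∈ d.values, l.Nodup) (w : Int) : ((pvInv d).getD w []).Nodup := by
  rw [pvInv_getD d hv w]
  have hsub : ((d.items.filter (fun p => decide (w ∈ p.2))).map (·.1)).Sublist
      (d.items.map (·.1)) := (List.filter_sublist.map _)
  have : (d.items.map (·.1)).Nodup := by
    simpa [PySem.Dict.keys] using hk
  exact this.sublist hsub

theorem mem_pvInv_getD (d : PySem.Dict Int (List Int)) (hk : d.keys.Nodup)
    (hv : ∀ l ∈ d.values, l.Nodup) (u w : Int) (hu : u ∈ d.keys) :
    u ∈ (pvInv d).getD w [] ↔ w ∈ d.getD u [] := by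
  rw [pvInv_getD d hv w]
  simp only [List.mem_map, List.mem_filter, decide_eq_true_eq]
  constructor
  · rintro ⟨p, ⟨hp, hw⟩, rfl⟩
    rw [PySem.Dict.getD_of_mem_items d (show (p.1, p.2) ∈ d.items from hp) hk []]
    exact hw
  · intro hw
    exact ⟨(u, d.getD u []), ⟨getD_eq_of_mem_keys d u hu, hw⟩, rfl⟩

theorem sum_map_ite (l : List Int) (Q : Int → Prop) [DecidablePred Q] :
    (l.map (fun w => if Q w then (1:ℕ) else 0)).sum = (l.filter (fun w => decide (Q w))).length := by
  rw [← List.countP_eq_length_filter]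
  induction l with
  | nil => rfl
  | cons x r ih => by_cases h : Q x <;> simp [ih, h]; omega

theorem length_filter_eq_of_mem_iff (l1 l2 : List Int) (h1 : l1.Nodup) (h2 : l2.Nodup)
    (h : ∀ x, x ∈ l1 ↔ x ∈ l2) : l1.length = l2.length := by
  rw [← List.toFinset_card_of_nodup h1, ← List.toFinset_card_of_nodup h2]
  congr 1
  ext x
  simp [h x]

theorem wedge_count (d : PySem.Dict Int (List Int)) (hk : d.keys.Nodup)
    (hv : ∀ l ∈ d.values, l.Nodup) (u v : Int) (hu : u ∈ d.keys) (hvk : v ∈ d.keys)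
    (huv : u < v) :
    (pvWedgeOf (pvInv d)).getD (u, v) 0
      = PySem.Set.len (PySem.Set.inter (d.getD u []) (d.getD v [])) := by
  have hfold : pvWedgeOf (pvInv d)
      = PySem.Dict.counter (((pvInv d).values.map
          (fun ins => pvPairs (PySem.List.sorted ins (fun x => x) false))).flatten) := by
    unfold pvWedgeOf
    rw [PySem.Dict.counter_eq_foldl, List.foldl_flatten, List.foldl_map]
    congr 1
    funext wd ins
    rw [pvWedgeLoop_eq_foldl]
  rw [hfold, PySem.Dict.getD_counter, List.count_flatten, List.map_map]
  have hvals : (pvInv d).values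
      = (pvInv d).keys.map (fun w => (pvInv d).getD w []) :=
    PySem.Dict.values_eq_map_keys (pvInv d) (pvInv_keys_nodup d) []
  rw [hvals, List.map_map]
  have hcong : ∀ w ∈ (pvInv d).keys,
      ((List.count (u, v) ∘ fun ins => pvPairs (PySem.List.sorted ins (fun x => x) false)) ∘
        fun w => (pvInv d).getD w []) w
      = (fun w => if w ∈ d.getD u [] ∧ w ∈ d.getD v [] then (1:ℕ) else 0) w := by
    intro w _
    simp only [Function.comp]
    rw [count_pvPairs _ (sorted_id_pairwise_lt _ (pvInv_getD_nodup d hk hv w)) u v]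
    simp only [PySem.List.mem_sorted]
    have hiff : (u ∈ (pvInv d).getD w [] ∧ v ∈ (pvInv d).getD w [] ∧ u < v)
        ↔ (w ∈ d.getD u [] ∧ w ∈ d.getD v []) := by
      rw [mem_pvInv_getD d hk hv u w hu, mem_pvInv_getD d hk hv v w hvk]
      constructor
      · exact fun h => ⟨h.1, h.2.1⟩
      · exact fun h => ⟨h.1, h.2, huv⟩
    simp only [hiff]
  rw [List.map_congr_left hcong, sum_map_ite]
  unfold PySem.Set.len PySem.Set.inter
  congr 1
  refine length_filter_eq_of_mem_iff _ _ ?_ ?_ ?_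
  · exact ((pvInv_keys_nodup d)).filter _
  · exact (getD_values_nodup d hv u hu).filter _
  · intro x
    simp only [List.mem_filter, decide_eq_true_eq, PySem.Set.contains]
    constructor
    · rintro ⟨_, hx1, hx2⟩
      exact ⟨hx1, by simpa [List.contains_iff_mem] using hx2⟩
    · rintro ⟨hx1, hx2⟩
      have hx2' : x ∈ d.getD v [] := by simpa [List.contains_iff_mem] using hx2
      refine ⟨?_, hx1, hx2'⟩
      exact (mem_pvInv_keys d x).mpr ⟨(u, d.getD u []), getD_eq_of_mem_keys d u hu, hx1⟩

theorem pairLoop_eq (d : PySem.Dict Int (List Int)) (wd : PySem.Dict (Int × Int) Int)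
    (nodes : List Int)
    (hc : ∀ u v, u ∈ nodes → v ∈ nodes → u < v →
      wd.getD (u, v) 0 = PySem.Set.len (PySem.Set.inter (d.getD u []) (d.getD v [])))
    (hs : nodes.Pairwise (· < ·)) (s : PySem.Dict Int Int × PySem.Dict Int Int) :
    pvPairLoopA d nodes s = pvPairLoopB d wd nodes s := by
  induction nodes generalizing s with
  | nil => rfl
  | cons u rest ih =>
      have hinner :
          (rest.foldl (fun s v =>
            let c := PySem.Set.len (PySem.Set.inter (d.getD u []) (d.getD v []))
            if PySem.Set.contains (d.getD u []) v then (s.1.modify c 0 (· + 1), s.2)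
            else (s.1, s.2.modify c 0 (· + 1))) s)
          = (rest.foldl (fun s v =>
            let c := wd.getD (u, v) 0
            if PySem.Set.contains (d.getD u []) v then (s.1.modify c 0 (· + 1), s.2)
            else (s.1, s.2.modify c 0 (· + 1))) s) := by
        refine PySem.List.foldl_congr_mem _ _ _ _ (fun acc v hvr => ?_)
        have huv : u < v := (List.pairwise_cons.mp hs).1 v hvr
        rw [hc u v (by simp) (by simp [hvr]) huv]
      simp only [pvPairLoopA, pvPairLoopB, hinner]
      exact ih (fun a b ha hb hab => hc a b (by simp [ha]) (by simp [hb]) hab)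
        (List.pairwise_cons.mp hs).2 _

-- ===== VERDICT (by name: the statement is the Claim_ definition above) =====
theorem common_neighbor_profiles_spec : Claim_equal_common_neighbor_profiles := by
  intro adj _
  unfold Spec_common_neighbor_profiles
  simp only [common_neighbor_profiles, common_neighbor_profiles_alt]
  have hk := pvAdjDict_keys_nodup adj
  have hv := pvAdjDict_values_nodup adj
  have hs := sorted_id_pairwise_lt (pvAdjDict adj).keys hk
  have hmem : ∀ x ∈ PySem.List.sorted (pvAdjDict adj).keys (fun x => x) false,
      x ∈ (pvAdjDict adj).keys := by
    intro x hx
    exact ((PySem.List.mem_sorted (pvAdjDict adj).keys (fun x => x) false x).mp hx)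
  rw [pairLoop_eq (pvAdjDict adj) (pvWedgeOf (pvInv (pvAdjDict adj))) _
    (fun u v hu hvv huv => wedge_count _ hk hv u v (hmem u hu) (hmem v hvv) huv) hs]
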